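-- pv_equiv track=rewrite | github.com/valaparthy-ww/aoc | year_2025/day2/day2.py | get_substring_repeated_n_times
-- ===== SOURCE A (Python) =====
-- def get_substring_repeated_n_times(low, high, repetition_count=None):
--     """sum of numbers in the range that are made of a substring repeated"""
--     res = 0
--     for i in range(low, high):
--         string_i = str(i)
--         for n in range(1, (len(string_i)//2)+1):
--             repetitions = repetition_count or len(string_i)//n
--             if string_i == string_i[0:n] * repetitions:
--                 res += i
--                 break
--     return res
-- ===== SOURCE B (Python) =====
-- def get_substring_repeated_n_times(low, high, repetition_count=None):
--     """sum of numbers in the range that are made of a substring repeated,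
--     computed by generating the repeated-pattern candidates directly"""
--     hi = high - 1
--     # number of decimal digits of hi (1 when hi < 10)
--     max_len, t = 1, hi
--     while t >= 10:
--         t //= 10
--         max_len += 1
--     seen = set()
--     total = 0
--     for n in range(1, max_len // 2 + 1):
--         base = 10 ** n
--         if repetition_count:
--             ks = [repetition_count] if 2 <= repetition_count <= max_len // n else []
--         else:
--             ks = list(range(2, max_len // n + 1))
--         for k in ks:
--             rep_unit = (base ** k - 1) // (base - 1)
--             for p in range(base // 10, base):
--                 num = p * rep_unit
--                 if low <= num < high and num not in seen:
--                     seen.add(num)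
--                     total += num
--     return total
-- ===== Notes on version B (the rewrite author's own statement) =====
-- stated objective: alternative
-- what changed: Instead of scanning every integer in [low, high) and testing its decimal string against each candidate period, B directly generates the repeated-pattern numbers (an n-digit pattern times the repunit 1+10^n+...+10^(n(k-1))) whose digit count fits below high, dedups them with a set and sums those inside the range; cost no longer depends on high-low.
import Mathlib
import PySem

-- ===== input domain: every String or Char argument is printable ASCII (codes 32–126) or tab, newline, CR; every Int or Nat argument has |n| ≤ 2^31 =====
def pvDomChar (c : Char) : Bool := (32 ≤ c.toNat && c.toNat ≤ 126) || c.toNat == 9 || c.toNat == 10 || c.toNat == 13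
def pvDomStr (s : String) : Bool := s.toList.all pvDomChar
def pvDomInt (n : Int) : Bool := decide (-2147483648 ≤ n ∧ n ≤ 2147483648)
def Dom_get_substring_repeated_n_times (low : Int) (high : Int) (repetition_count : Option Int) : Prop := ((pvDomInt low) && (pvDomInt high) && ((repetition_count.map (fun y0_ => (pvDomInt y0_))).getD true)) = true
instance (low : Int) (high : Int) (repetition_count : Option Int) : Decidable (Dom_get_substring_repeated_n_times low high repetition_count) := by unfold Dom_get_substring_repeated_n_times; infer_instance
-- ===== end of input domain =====

-- B sums the same numbers as A but generates the repeated-pattern candidates directly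
-- (pattern * repunit) instead of scanning every integer of the range; both are pure.

-- ===== PORT A =====
-- repetitions = repetition_count or len(string_i)//n   (Python 'or': None and 0 are falsy)
def aRepetitions (lenS n : Int) (rc : Option Int) : Int :=
  match rc with
  | none => PySem.Int.floordiv lenS n
  | some r => if r = 0 then PySem.Int.floordiv lenS n else r

-- 'for n in range(1, len//2+1): if string_i == string_i[0:n]*repetitions: res += i; break'
-- — the break loop as first-match recursion over the list of n
def aInner (s : List Char) (rc : Option Int) : List Int → Bool
  | [] => false
  | n :: rest =>
    if s == PySem.List.pyRepeat (PySem.List.slice s (some 0) (some n)) (aRepetitions (s.length : Int) n rc)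
    then true
    else aInner s rc rest

def get_substring_repeated_n_times (low : Int) (high : Int) (repetition_count : Option Int) : Int :=
  (PySem.List.pyRange low high 1).foldl (fun res i =>
    let s := PySem.Int.toChars i
    if aInner s repetition_count (PySem.List.pyRange 1 (PySem.Int.floordiv (s.length : Int) 2 + 1) 1)
    then res + i else res) 0

-- ===== PORT B =====
-- 'max_len, t = 1, hi' then 'while t >= 10: t //= 10; max_len += 1'
def bDigitCount (t : Int) (acc : Int) : Int :=
  if 10 ≤ t then bDigitCount (PySem.Int.floordiv t 10) (acc + 1) else acc
termination_by t.toNat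
decreasing_by
  have ht : (t.toNat : Int) = t := Int.toNat_of_nonneg (by omega)
  rw [← ht, show ((10:Int)) = ((10:Nat):Int) by norm_num, PySem.Int.floordiv_natCast]
  simp only [Int.toNat_natCast]
  exact Nat.div_lt_self (by omega) (by norm_num)

-- 'ks = [repetition_count] if 2 <= repetition_count <= max_len // n else []' when repetition_count
-- is truthy, else 'list(range(2, max_len // n + 1))'
def bKs (rc : Option Int) (maxLen n : Int) : List Int :=
  match rc with
  | some r =>
    if r ≠ 0 then (if 2 ≤ r ∧ r ≤ PySem.Int.floordiv maxLen n then [r] else [])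
    else PySem.List.pyRange 2 (PySem.Int.floordiv maxLen n + 1) 1
  | none => PySem.List.pyRange 2 (PySem.Int.floordiv maxLen n + 1) 1

-- 'if low <= num < high and num not in seen: seen.add(num); total += num'
def bStep (low high : Int) (st : PySem.Set Int × Int) (num : Int) : PySem.Set Int × Int :=
  if low ≤ num ∧ num < high ∧ ¬ PySem.Set.contains st.1 num = true
  then (PySem.Set.add st.1 num, st.2 + num) else st

def get_substring_repeated_n_times_alt (low : Int) (high : Int) (repetition_count : Option Int) : Int :=
  let hi := high - 1
  let maxLen := bDigitCount hi 1
  let st := (PySem.List.pyRange 1 (PySem.Int.floordiv maxLen 2 + 1) 1).foldl (fun st n =>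
    let base : Int := 10 ^ n.toNat   -- 10 ** n (exact: n ≥ 1 on this range)
    (bKs repetition_count maxLen n).foldl (fun st k =>
      -- rep_unit = (base ** k - 1) // (base - 1)   (k ≥ 2 on this list)
      let repUnit := PySem.Int.floordiv (base ^ k.toNat - 1) (base - 1)
      (PySem.List.pyRange (PySem.Int.floordiv base 10) base 1).foldl (fun st p =>
        bStep low high st (p * repUnit)) st) st) (PySem.Set.empty, 0)
  st.2

-- ===== PRECONDITION & SPEC =====
def Spec_get_substring_repeated_n_times (low : Int) (high : Int) (repetition_count : Option Int) (out : Int) : Prop := out = get_substring_repeated_n_times_alt low high repetition_count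
instance (low : Int) (high : Int) (repetition_count : Option Int) (out : Int) : Decidable (Spec_get_substring_repeated_n_times low high repetition_count out) := by unfold Spec_get_substring_repeated_n_times; infer_instance

-- ===== CLAIM (what is proved, stated in full; the proofs are below) =====
def Claim_equal_get_substring_repeated_n_times : Prop := ∀ (low : Int) (high : Int) (repetition_count : Option Int), Dom_get_substring_repeated_n_times low high repetition_count → Spec_get_substring_repeated_n_times low high repetition_count (get_substring_repeated_n_times low high repetition_count)

-- ===== LEMMAS AND PROOFS =====

-- ---- proof-only abbreviations ----

-- the per-i test A performs
def chk (rc : Option Int) (i : Int) : Bool :=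
  aInner (PySem.Int.toChars i) rc
    (PySem.List.pyRange 1 (PySem.Int.floordiv ((PySem.Int.toChars i).length : Int) 2 + 1) 1)

-- the repunit 1 + 10^n + (10^n)^2 + ... + (10^n)^(k-1)
def RN (n k : Nat) : Nat := ∑ j ∈ Finset.range k, (10 ^ n) ^ j

-- k copies of a digit block, little-endian
def blocks (k : Nat) (B : List Nat) : List Nat := (List.replicate k B).flatten

-- does k agree with the repetition_count argument (falsy = unconstrained)?
def RCok (rc : Option Int) (k : Nat) : Prop :=
  match rc with
  | none => True
  | some r => r = 0 ∨ r = (k : Int)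

-- "m is a pattern of n digits repeated k ≥ 2 times", stated over Nat
def GoodN (rc : Option Int) (m : Nat) : Prop :=
  ∃ n k p : Nat, 1 ≤ n ∧ 2 ≤ k ∧ RCok rc k ∧ 10 ^ (n - 1) ≤ p ∧ p < 10 ^ n ∧ m = p * RN n k

-- the stream of candidates B enumerates
def bStream (maxLen : Int) (rc : Option Int) : List Int :=
  (PySem.List.pyRange 1 (PySem.Int.floordiv maxLen 2 + 1) 1).flatMap (fun n =>
    (bKs rc maxLen n).flatMap (fun k =>
      (PySem.List.pyRange (PySem.Int.floordiv ((10:Int) ^ n.toNat) 10) ((10:Int) ^ n.toNat) 1).map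
        (fun p => p * PySem.Int.floordiv (((10:Int) ^ n.toNat) ^ k.toNat - 1) ((10:Int) ^ n.toNat - 1))))


lemma flatten_replicate_comm {α} (k : Nat) (Y : List α) :
    (List.replicate k Y).flatten ++ Y = Y ++ (List.replicate k Y).flatten := by
  induction k with
  | zero => simp
  | succ k ih => simp only [List.replicate_succ, List.flatten_cons, List.append_assoc, ih]

lemma flatten_replicate_reverse {α} (k : Nat) (T : List α) :
    ((List.replicate k T).flatten).reverse = (List.replicate k T.reverse).flatten := by
  induction k with
  | zero => simp
  | succ k ih =>
    simp only [List.replicate_succ, List.flatten_cons, List.reverse_append, ih]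
    exact flatten_replicate_comm k T.reverse

lemma flatten_replicate_map {α β} (f : α → β) (k : Nat) (B : List α) :
    ((List.replicate k B).flatten).map f = (List.replicate k (B.map f)).flatten := by
  simp [List.map_flatten, List.map_replicate]

lemma blocks_succ (k : Nat) (B : List Nat) : blocks (k + 1) B = B ++ blocks k B := by
  simp [blocks, List.replicate_succ]

lemma take_blocks {α} (k : Nat) (B : List α) (hk : 1 ≤ k) :
    ((List.replicate k B).flatten).take B.length = B := by
  cases k with
  | zero => omega
  | succ k => simp [List.replicate_succ, List.take_left]

lemma digitChar_toNat (d : Nat) (hd : d < 10) : (Nat.digitChar d).toNat - 48 = d := by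
  interval_cases d <;> rfl

lemma digitChar_ne_minus (d : Nat) (hd : d < 10) : Nat.digitChar d ≠ '-' := by
  interval_cases d <;> decide

lemma map_dec_map_digitChar (L : List Nat) (hL : ∀ a ∈ L, a < 10) :
    (L.map Nat.digitChar).map (fun ch => ch.toNat - 48) = L := by
  induction L with
  | nil => rfl
  | cons a L ih =>
    simp only [List.map_cons, List.cons.injEq]
    exact ⟨digitChar_toNat a (hL a (by simp)), ih (fun b hb => hL b (by simp [hb]))⟩

lemma toDigitsCore_eq (f : Nat) : ∀ (n : Nat) (l : List Char), 0 < n → n < f →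
    Nat.toDigitsCore 10 f n l = ((Nat.digits 10 n).map Nat.digitChar).reverse ++ l := by
  induction f with
  | zero => intro n l hn hf; omega
  | succ f ih =>
    intro n l hn hf
    rw [Nat.toDigitsCore]
    by_cases h : n / 10 = 0
    · have hlt : n < 10 := by omega
      simp only [h, if_true]
      rw [Nat.digits_def' (by norm_num : (1:ℕ) < 10) hn, h]
      simp [Nat.mod_eq_of_lt hlt]
    · simp only [h, if_false]
      rw [ih (n / 10) _ (Nat.pos_of_ne_zero h)
        (by have := Nat.div_lt_self hn (by norm_num : 1 < 10); omega)]
      rw [Nat.digits_def' (by norm_num : (1:ℕ) < 10) hn]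
      simp

lemma toChars_pos (x : Int) (hx : 1 ≤ x) :
    PySem.Int.toChars x = ((Nat.digits 10 x.toNat).map Nat.digitChar).reverse := by
  have h1 : ¬ x < 0 := by omega
  simp only [PySem.Int.toChars, h1, if_false, Nat.toDigits]
  rw [toDigitsCore_eq _ _ _ (by omega) (by omega)]
  simp

lemma toChars_neg (x : Int) (hx : x < 0) :
    PySem.Int.toChars x = '-' :: ((Nat.digits 10 x.natAbs).map Nat.digitChar).reverse := by
  simp only [PySem.Int.toChars, hx, if_true, Nat.toDigits]
  rw [toDigitsCore_eq _ _ _ (by omega) (by omega)]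
  simp

lemma getLast?_blocks (k : Nat) (B : List Nat) (hk : 1 ≤ k) :
    (blocks k B).getLast? = B.getLast? := by
  induction k with
  | zero => omega
  | succ k ih =>
    rcases Nat.eq_zero_or_pos k with h | h
    · subst h; simp [blocks]
    · rw [blocks_succ, List.getLast?_append, ih h]
      cases hB : B.getLast? with
      | none => have : B = [] := List.getLast?_eq_none_iff.mp hB; simp [this]
      | some a => simp

lemma ofDigits_blocks (n k : Nat) (B : List Nat) (hB : B.length = n) :
    Nat.ofDigits 10 (blocks k B) = Nat.ofDigits 10 B * RN n k := by
  induction k with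
  | zero => simp [blocks, RN, Nat.ofDigits]
  | succ k ih =>
    rw [blocks_succ, Nat.ofDigits_append, ih, hB]
    have : RN n (k + 1) = 1 + 10 ^ n * RN n k := by
      simp [RN, Finset.sum_range_succ', Finset.mul_sum, pow_succ, mul_comm, mul_assoc, mul_left_comm]
      omega
    rw [this]; ring

lemma digits_mul_RN (n k p : Nat) (hp : 1 ≤ p) (hk : 1 ≤ k)
    (hlen : (Nat.digits 10 p).length = n) :
    Nat.digits 10 (p * RN n k) = blocks k (Nat.digits 10 p) := by
  have h1 : p * RN n k = Nat.ofDigits 10 (blocks k (Nat.digits 10 p)) := by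
    rw [ofDigits_blocks n k _ hlen, Nat.ofDigits_digits]
  rw [h1]
  apply Nat.digits_ofDigits 10 (by norm_num)
  · intro l hl
    simp only [blocks, List.mem_flatten] at hl
    obtain ⟨L, hL, hl⟩ := hl
    rw [List.eq_of_mem_replicate hL] at hl
    exact Nat.digits_lt_base (by norm_num) hl
  · intro h
    have hne : Nat.digits 10 p ≠ [] := Nat.digits_ne_nil_iff_ne_zero.mpr (by omega)
    have h2 := getLast?_blocks k (Nat.digits 10 p) hk
    rw [List.getLast?_eq_some_getLast h, List.getLast?_eq_some_getLast hne] at h2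
    rw [Option.some_inj.mp h2]
    exact Nat.getLast_digit_ne_zero 10 (by omega)

lemma digits_len_bounds (n p : Nat) (hlen : (Nat.digits 10 p).length = n) (hp : p ≠ 0) :
    10 ^ (n - 1) ≤ p ∧ p < 10 ^ n := by
  constructor
  · have h1 := Nat.length_digits 10 p (by norm_num) hp
    have h2 := Nat.pow_log_le_self 10 hp
    have h3 : Nat.log 10 p = n - 1 := by omega
    rw [h3] at h2
    exact h2
  · rw [← hlen]; exact Nat.lt_base_pow_length_digits (by norm_num)

lemma digits_len_of_bounds (n p : Nat) (hn : 1 ≤ n) (h1 : 10 ^ (n - 1) ≤ p) (h2 : p < 10 ^ n) :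
    (Nat.digits 10 p).length = n := by
  have hp : p ≠ 0 := by
    have : 1 ≤ 10 ^ (n - 1) := Nat.one_le_pow _ _ (by norm_num)
    omega
  rw [Nat.length_digits 10 p (by norm_num) hp]
  have := Nat.log_eq_of_pow_le_of_lt_pow (b := 10) (m := n - 1) h1 (by
    have : n - 1 + 1 = n := by omega
    rw [this]; exact h2)
  omega

lemma digits_len_mono (a b : Nat) (ha : a ≠ 0) (hab : a ≤ b) :
    (Nat.digits 10 a).length ≤ (Nat.digits 10 b).length := by
  rw [Nat.length_digits 10 a (by norm_num) ha, Nat.length_digits 10 b (by norm_num) (by omega)]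
  have := Nat.log_mono_right (b := 10) hab
  omega

lemma repUnit_eq (n k : Nat) (hn : 1 ≤ n) :
    PySem.Int.floordiv (((10:Int) ^ n) ^ k - 1) ((10:Int) ^ n - 1) = (RN n k : Int) := by
  have hX : (10:Int) ≤ 10 ^ n := by
    calc (10:Int) = 10 ^ 1 := by ring
    _ ≤ 10 ^ n := by apply pow_le_pow_right₀ (by norm_num) hn
  have hpos : (0:Int) < 10 ^ n - 1 := by omega
  rw [PySem.Int.floordiv_eq_ediv_of_pos hpos]
  have hg := geom_sum_mul ((10:Int) ^ n) k
  have : ((10:Int) ^ n) ^ k - 1 = (10 ^ n - 1) * (∑ i ∈ Finset.range k, ((10:Int) ^ n) ^ i) := by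
    rw [← hg]; ring
  rw [this, Int.mul_ediv_cancel_left _ (by omega)]
  push_cast [RN]
  rfl

lemma digits_len_single (m : Nat) (h1 : 1 ≤ m) (h2 : m < 10) : (Nat.digits 10 m).length = 1 := by
  rw [Nat.digits_def' (by norm_num : (1:ℕ) < 10) h1]
  have : m / 10 = 0 := by omega
  simp [this]

lemma bDigitCount_aux (N : Nat) : ∀ (t acc : Int), t.toNat ≤ N → 1 ≤ t →
    bDigitCount t acc = acc + ((Nat.digits 10 t.toNat).length : Int) - 1 := by
  induction N with
  | zero => intro t acc h1 h2; omega
  | succ N ih =>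
    intro t acc h1 h2
    rw [bDigitCount]
    by_cases h : 10 ≤ t
    · have hcast : PySem.Int.floordiv t 10 = ((t.toNat / 10 : Nat) : Int) := by
        have ht : (t.toNat : Int) = t := Int.toNat_of_nonneg (by omega)
        rw [← ht, show ((10:Int)) = ((10:Nat):Int) by norm_num, PySem.Int.floordiv_natCast, ht]
      have hm : 1 ≤ t.toNat / 10 := by omega
      rw [if_pos h, hcast, ih _ _ (by simp only [Int.toNat_natCast]; omega) (by exact_mod_cast hm)]
      rw [Nat.digits_def' (by norm_num : (1:ℕ) < 10) (show 0 < t.toNat by omega)]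
      simp only [Int.toNat_natCast, List.length_cons]
      push_cast
      ring
    · rw [if_neg h, digits_len_single t.toNat (by omega) (by omega)]
      omega

lemma bDigitCount_eq (t : Int) (ht : 1 ≤ t) :
    bDigitCount t 1 = ((Nat.digits 10 t.toNat).length : Int) := by
  have := bDigitCount_aux t.toNat t 1 (le_refl _) ht
  omega

lemma count_flatten_replicate (r : Nat) (T : List Char) (ch : Char) :
    ((List.replicate r T).flatten).count ch = r * T.count ch := by
  induction r with
  | zero => simp
  | succ r ih => simp [List.replicate_succ, List.count_append, ih, Nat.succ_mul]; omega

lemma aInner_eq_any (s : List Char) (rc : Option Int) (ns : List Int) :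
    aInner s rc ns = ns.any (fun n =>
      s == PySem.List.pyRepeat (PySem.List.slice s (some 0) (some n))
        (aRepetitions (s.length : Int) n rc)) := by
  induction ns with
  | nil => rfl
  | cons n rest ih =>
    rw [aInner, List.any_cons, ih]
    cases hb : (s == PySem.List.pyRepeat (PySem.List.slice s (some 0) (some n)) (aRepetitions (s.length : Int) n rc)) <;> simp

lemma chk_iff_exists (rc : Option Int) (x : Int) :
    chk rc x = true ↔ ∃ nI : Int, 1 ≤ nI ∧
      nI ≤ PySem.Int.floordiv (((PySem.Int.toChars x).length : Nat) : Int) 2 ∧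
      PySem.Int.toChars x = PySem.List.pyRepeat
        (PySem.List.slice (PySem.Int.toChars x) (some 0) (some nI))
        (aRepetitions ((PySem.Int.toChars x).length : Int) nI rc) := by
  rw [chk, aInner_eq_any, List.any_eq_true]
  constructor
  · rintro ⟨nI, hmem, hbeq⟩
    rw [PySem.List.mem_pyRange_one] at hmem
    exact ⟨nI, hmem.1, by omega, by simpa using hbeq⟩
  · rintro ⟨nI, h1, h2, heq⟩
    exact ⟨nI, PySem.List.mem_pyRange_one.mpr ⟨h1, by omega⟩, by simpa using heq⟩

lemma cond_struct (s : List Char) (nI rep : Int) (h1 : 1 ≤ nI)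
    (h2 : nI ≤ PySem.Int.floordiv ((s.length : Nat) : Int) 2)
    (heq : s = PySem.List.pyRepeat (PySem.List.slice s (some 0) (some nI)) rep) :
    2 ≤ rep.toNat ∧ s.length = rep.toNat * nI.toNat ∧ nI.toNat ≤ s.length ∧
      s = (List.replicate rep.toNat (s.take nI.toNat)).flatten := by
  have h2' : nI * 2 ≤ ((s.length : Nat) : Int) := by
    rw [← PySem.Int.le_floordiv_iff_mul_le (by norm_num)]
    exact h2
  have hnn : 2 * nI.toNat ≤ s.length := by omega
  have hnle : nI.toNat ≤ s.length := by omega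
  have hslice : PySem.List.slice s (some 0) (some nI) = s.take nI.toNat := by
    rw [PySem.List.slice_zero_start]
    exact PySem.List.slice_to s (by omega)
  rw [hslice] at heq
  have hrep : PySem.List.pyRepeat (s.take nI.toNat) rep = (List.replicate rep.toNat (s.take nI.toNat)).flatten := rfl
  rw [hrep] at heq
  have hlen : s.length = rep.toNat * nI.toNat := by
    conv_lhs => rw [heq]
    simp [List.length_flatten, List.map_replicate, List.sum_replicate, smul_eq_mul,
      List.length_take, Nat.min_eq_left hnle]
  refine ⟨?_, hlen, hnle, heq⟩
  rcases Nat.lt_or_ge rep.toNat 2 with hr | hr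
  · exfalso
    have : rep.toNat * nI.toNat ≤ 1 * nI.toNat := Nat.mul_le_mul_right _ (by omega)
    omega
  · exact hr

lemma chk_nonpos (rc : Option Int) (x : Int) (hx : x ≤ 0) : chk rc x = false := by
  by_cases h0 : x = 0
  · subst h0
    have hr : PySem.List.pyRange 1 (PySem.Int.floordiv (((PySem.Int.toChars 0).length : Nat) : Int) 2 + 1) 1 = [] := by
      decide
    unfold chk
    rw [hr]
    rfl
  · have hneg : x < 0 := by omega
    by_contra hc
    have hcc : chk rc x = true := by revert hc; cases chk rc x <;> simp
    rw [chk_iff_exists] at hcc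
    obtain ⟨nI, h1, h2, heq⟩ := hcc
    obtain ⟨hr2, hlen, hnle, hflat⟩ := cond_struct _ nI _ h1 h2 heq
    have hs := toChars_neg x hneg
    have hcount1 : (PySem.Int.toChars x).count '-' = 1 := by
      rw [hs, List.count_cons_self]
      have : ((Nat.digits 10 x.natAbs).map Nat.digitChar).reverse.count '-' = 0 := by
        rw [List.count_eq_zero]
        intro hmem
        rw [List.mem_reverse, List.mem_map] at hmem
        obtain ⟨a, ha, hda⟩ := hmem
        exact digitChar_ne_minus a (Nat.digits_lt_base (by norm_num) ha) hda
      omega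
    have hcount2 : (PySem.Int.toChars x).count '-' =
        (aRepetitions ((PySem.Int.toChars x).length : Int) nI rc).toNat *
          ((PySem.Int.toChars x).take nI.toNat).count '-' := by
      conv_lhs => rw [hflat]
      exact count_flatten_replicate _ _ _
    have hmemT : '-' ∈ (PySem.Int.toChars x).take nI.toNat := by
      rw [hs]
      have hnn : 1 ≤ nI.toNat := by omega
      obtain ⟨mm, hmm⟩ : ∃ mm, nI.toNat = mm + 1 := ⟨nI.toNat - 1, by omega⟩
      rw [hmm, List.take_succ_cons]
      exact List.mem_cons_self
    have hTpos : 0 < ((PySem.Int.toChars x).take nI.toNat).count '-' :=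
      List.count_pos_iff.mpr hmemT
    have := Nat.mul_le_mul hr2 hTpos
    omega

lemma chk_iff (rc : Option Int) (x : Int) (hx : 1 ≤ x) :
    chk rc x = true ↔ GoodN rc x.toNat := by
  have hm1 : 1 ≤ x.toNat := by omega
  have hDne : Nat.digits 10 x.toNat ≠ [] := Nat.digits_ne_nil_iff_ne_zero.mpr (by omega)
  have hDlt : ∀ a ∈ Nat.digits 10 x.toNat, a < 10 :=
    fun a ha => Nat.digits_lt_base (by norm_num) ha
  have hs : PySem.Int.toChars x = ((Nat.digits 10 x.toNat).map Nat.digitChar).reverse :=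
    toChars_pos x hx
  have hslen : (PySem.Int.toChars x).length = (Nat.digits 10 x.toNat).length := by
    rw [hs]; simp
  rw [chk_iff_exists]
  constructor
  · rintro ⟨nI, h1, h2, heq⟩
    obtain ⟨hr2, hlen, hnle, hflat⟩ := cond_struct _ nI _ h1 h2 heq
    set D := Nat.digits 10 x.toNat with hD
    set d := D.length with hd
    set nn := nI.toNat with hnn
    set r := (aRepetitions ((PySem.Int.toChars x).length : Int) nI rc).toNat with hrdef
    have hdlen : d = r * nn := by omega
    have hnnd : nn ≤ d := by omega
    have hTrev : (List.take nn ((D.map Nat.digitChar).reverse)).reverse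
        = (D.drop (d - nn)).map Nat.digitChar := by
      rw [List.take_reverse, List.reverse_reverse, List.length_map, ← List.map_drop]
    have hmap : D.map Nat.digitChar =
        (List.replicate r ((D.drop (d - nn)).map Nat.digitChar)).flatten := by
      have h3 := congrArg List.reverse hflat
      rw [hs, List.reverse_reverse, flatten_replicate_reverse, hTrev] at h3
      exact h3
    have hDeq : D = (List.replicate r (D.drop (d - nn))).flatten := by
      have h3 := congrArg (List.map (fun ch => ch.toNat - 48)) hmap
      rw [map_dec_map_digitChar D hDlt, flatten_replicate_map,
        map_dec_map_digitChar (D.drop (d - nn))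
          (fun a ha => hDlt a (List.mem_of_mem_drop ha))] at h3
      exact h3
    set B := D.drop (d - nn) with hB
    have hBlen : B.length = nn := by
      rw [hB, List.length_drop]
      omega
    have hBne : B ≠ [] := by
      intro h
      rw [h] at hBlen
      simp at hBlen
      omega
    have hlastB : B.getLast? = D.getLast? := by
      conv_rhs => rw [hDeq]
      exact (getLast?_blocks r B (by omega)).symm
    set p := Nat.ofDigits 10 B with hp
    have hdigp : Nat.digits 10 p = B := by
      apply Nat.digits_ofDigits 10 (by norm_num) B
        (fun a ha => hDlt a (List.mem_of_mem_drop ha))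
      intro h
      rw [List.getLast?_eq_some_getLast h, List.getLast?_eq_some_getLast hDne] at hlastB
      rw [Option.some_inj.mp hlastB]
      exact Nat.getLast_digit_ne_zero 10 (by omega)
    have hplen : (Nat.digits 10 p).length = nn := by rw [hdigp]; exact hBlen
    have hpne : p ≠ 0 := by
      intro hzero
      rw [hzero, Nat.digits_zero] at hdigp
      exact hBne hdigp.symm
    obtain ⟨hp1, hp2⟩ := digits_len_bounds nn p hplen hpne
    have hmval : x.toNat = p * RN nn r := by
      have h4 : x.toNat = Nat.ofDigits 10 D := (Nat.ofDigits_digits 10 x.toNat).symm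
      rw [h4]
      conv_lhs => rw [hDeq]
      exact ofDigits_blocks nn r B hBlen
    have hRC : RCok rc r := by
      cases rc with
      | none => trivial
      | some r' =>
        by_cases hz : r' = 0
        · exact Or.inl hz
        · right
          have harep : aRepetitions ((PySem.Int.toChars x).length : Int) nI (some r') = r' := by
            simp [aRepetitions, hz]
          rw [hrdef, harep] at hr2 ⊢
          omega
    exact ⟨nn, r, p, by omega, hr2, hRC, hp1, hp2, hmval⟩
  · rintro ⟨n, k, p, hn, hk, hRC, hp1, hp2, hmval⟩
    have hplen : (Nat.digits 10 p).length = n := digits_len_of_bounds n p hn hp1 hp2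
    have hpne : 1 ≤ p := by
      have : 1 ≤ 10 ^ (n - 1) := Nat.one_le_pow _ _ (by norm_num)
      omega
    set B := Nat.digits 10 p with hBdef
    have hDeq : Nat.digits 10 x.toNat = (List.replicate k B).flatten := by
      rw [hmval]
      exact digits_mul_RN n k p hpne (by omega) hplen
    have hdlen : (Nat.digits 10 x.toNat).length = k * n := by
      rw [hDeq]
      simp [List.length_flatten, List.map_replicate, List.sum_replicate, smul_eq_mul, hBdef]
      exact Or.inl hplen
    set T := (B.map Nat.digitChar).reverse with hT
    have hTlen : T.length = n := by rw [hT]; simp [hplen]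
    have hsT : PySem.Int.toChars x = (List.replicate k T).flatten := by
      rw [hs, hDeq, flatten_replicate_map, flatten_replicate_reverse]
    refine ⟨(n : Int), by exact_mod_cast hn, ?_, ?_⟩
    · rw [PySem.Int.le_floordiv_iff_mul_le (by norm_num : (0:Int) < 2)]
      have h6 : (PySem.Int.toChars x).length = k * n := by rw [hslen, hdlen]
      rw [h6]
      have h7 : 2 * n ≤ k * n := Nat.mul_le_mul_right n hk
      push_cast
      omega
    · have hslice : PySem.List.slice (PySem.Int.toChars x) (some 0) (some (n : Int)) = T := by
        rw [PySem.List.slice_zero_start]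
        have h5 := PySem.List.slice_to (PySem.Int.toChars x) (b := (n : Int)) (by omega)
        rw [h5, Int.toNat_natCast, hsT, ← hTlen, take_blocks k T (by omega)]
      have hrepval : aRepetitions ((PySem.Int.toChars x).length : Int) (n : Int) rc = (k : Int) := by
        have hfd : PySem.Int.floordiv ((PySem.Int.toChars x).length : Int) (n : Int) = (k : Int) := by
          rw [hslen, hdlen, PySem.Int.floordiv_natCast]
          rw [Nat.mul_div_cancel _ (by omega)]
        cases rc with
        | none => simp [aRepetitions, hfd]
        | some r' =>
          rcases hRC with hz | hkr
          · simp [aRepetitions, hz, hfd]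
          · have hzne : r' ≠ 0 := by rw [hkr]; exact_mod_cast (by omega : (k:Int) ≠ 0)
            simp only [aRepetitions, if_neg hzne]
            exact hkr
      rw [hslice, hrepval]
      rw [hsT]
      show _ = (List.replicate ((k:Int)).toNat T).flatten
      rw [Int.toNat_natCast]
lemma floordiv_pow_ten (n : Nat) (hn : 1 ≤ n) :
    PySem.Int.floordiv ((10:Int) ^ n) 10 = (10:Int) ^ (n - 1) := by
  obtain ⟨m, rfl⟩ : ∃ m, n = m + 1 := ⟨n - 1, by omega⟩
  rw [show ((10:Int) ^ (m+1)) = (((10 ^ (m+1) : Nat)) : Int) by push_cast; ring,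
    show ((10:Int)) = ((10:Nat):Int) by norm_num, PySem.Int.floordiv_natCast]
  rw [pow_succ, Nat.mul_div_cancel _ (by norm_num)]
  push_cast
  simp

lemma RN_pos (n k : Nat) (hk : 1 ≤ k) : 1 ≤ RN n k := by
  have h0 : (0:Nat) ∈ Finset.range k := Finset.mem_range.mpr (by omega)
  have := Finset.single_le_sum (f := fun j => (10 ^ n) ^ j) (fun i _ => Nat.zero_le _) h0
  simpa [RN] using this

lemma stream_shape (maxLen : Int) (rc : Option Int) (x : Int) (hx : x ∈ bStream maxLen rc) :
    ∃ n k p : Nat, 1 ≤ n ∧ 2 ≤ k ∧ RCok rc k ∧ 10 ^ (n - 1) ≤ p ∧ p < 10 ^ n ∧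
      x = ((p * RN n k : Nat) : Int) := by
  rw [bStream, List.mem_flatMap] at hx
  obtain ⟨nI, hnmem, hx⟩ := hx
  rw [List.mem_flatMap] at hx
  obtain ⟨kI, hkmem, hx⟩ := hx
  rw [List.mem_map] at hx
  obtain ⟨pI, hpmem, hx⟩ := hx
  rw [PySem.List.mem_pyRange_one] at hnmem hpmem
  have hn1 : 1 ≤ nI := hnmem.1
  set n := nI.toNat with hn
  have hnI : nI = (n : Int) := by omega
  have hk2 : 2 ≤ kI := by
    cases rc with
    | none =>
      rw [bKs, PySem.List.mem_pyRange_one] at hkmem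
      exact hkmem.1
    | some r =>
      rw [bKs] at hkmem
      by_cases hz : r = 0
      · simp only [hz, ne_eq, not_true_eq_false, if_false, PySem.List.mem_pyRange_one] at hkmem
        exact hkmem.1
      · simp only [ne_eq, hz, not_false_eq_true, if_true] at hkmem
        by_cases hcond : 2 ≤ r ∧ r ≤ PySem.Int.floordiv maxLen nI
        · rw [if_pos hcond, List.mem_singleton] at hkmem
          omega
        · rw [if_neg hcond] at hkmem
          simp at hkmem
  set k := kI.toNat with hkd
  have hkI : kI = (k : Int) := by omega
  have hRC : RCok rc k := by
    cases rc with
    | none => trivial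
    | some r =>
      by_cases hz : r = 0
      · exact Or.inl hz
      · right
        rw [bKs] at hkmem
        simp only [ne_eq, hz, not_false_eq_true, if_true] at hkmem
        by_cases hcond : 2 ≤ r ∧ r ≤ PySem.Int.floordiv maxLen nI
        · rw [if_pos hcond, List.mem_singleton] at hkmem
          omega
        · rw [if_neg hcond] at hkmem
          simp at hkmem
  rw [floordiv_pow_ten n (by omega)] at hpmem
  have hp1 : (10:Int) ^ (n - 1) ≤ pI := hpmem.1
  have hp2 : pI < (10:Int) ^ n := hpmem.2
  have hcast1 : ((10:Int) ^ (n-1)) = ((10^(n-1) : Nat) : Int) := by push_cast; ring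
  have h1n : (1:Int) ≤ (10:Int)^(n-1) := by
    rw [hcast1]; exact_mod_cast Nat.one_le_pow _ _ (by norm_num)
  have hppos : 1 ≤ pI := le_trans h1n hp1
  set p := pI.toNat with hpd
  have hpI : pI = (p : Int) := by omega
  refine ⟨n, k, p, by omega, by omega, hRC, ?_, ?_, ?_⟩
  · have : ((10:Int) ^ (n-1)) = ((10 ^ (n-1) : Nat) : Int) := by push_cast; ring
    rw [this, hpI] at hp1
    exact_mod_cast hp1
  · have : ((10:Int) ^ n) = ((10 ^ n : Nat) : Int) := by push_cast; ring
    rw [this, hpI] at hp2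
    exact_mod_cast hp2
  · rw [repUnit_eq n k (by omega)] at hx
    rw [← hx, hpI]
    push_cast
    ring

lemma bStream_pos (maxLen : Int) (rc : Option Int) (x : Int) (hx : x ∈ bStream maxLen rc) :
    1 ≤ x := by
  obtain ⟨n, k, p, hn, hk, _, hp1, _, hxe⟩ := stream_shape maxLen rc x hx
  have hpp : 1 ≤ p := le_trans (Nat.one_le_pow _ _ (by norm_num)) hp1
  have := RN_pos n k (by omega)
  have : 1 ≤ p * RN n k := Nat.one_le_iff_ne_zero.mpr (by positivity)
  omega

lemma mem_bStream (dHi : Nat) (rc : Option Int) (x : Int) (hx : 1 ≤ x)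
    (hd : (Nat.digits 10 x.toNat).length ≤ dHi) :
    x ∈ bStream ((dHi : Nat) : Int) rc ↔ GoodN rc x.toNat := by
  constructor
  · intro hmem
    obtain ⟨n, k, p, hn, hk, hRC, hp1, hp2, hxe⟩ := stream_shape _ rc x hmem
    exact ⟨n, k, p, hn, hk, hRC, hp1, hp2, by omega⟩
  · rintro ⟨n, k, p, hn, hk, hRC, hp1, hp2, hmval⟩
    have hplen : (Nat.digits 10 p).length = n := digits_len_of_bounds n p hn hp1 hp2
    have hpne : 1 ≤ p := by
      have : 1 ≤ 10 ^ (n - 1) := Nat.one_le_pow _ _ (by norm_num)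
      omega
    have hdlen : (Nat.digits 10 x.toNat).length = k * n := by
      rw [hmval, digits_mul_RN n k p hpne (by omega) hplen]
      simp [blocks, List.length_flatten, List.map_replicate, List.sum_replicate, smul_eq_mul]
      exact Or.inl hplen
    have hkn : k * n ≤ dHi := by omega
    rw [bStream, List.mem_flatMap]
    refine ⟨(n : Int), ?_, ?_⟩
    · rw [PySem.List.mem_pyRange_one]
      refine ⟨by exact_mod_cast hn, ?_⟩
      have h2n : 2 * n ≤ k * n := Nat.mul_le_mul_right n hk
      have : (n:Int) ≤ PySem.Int.floordiv ((dHi : Nat) : Int) 2 := by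
        rw [PySem.Int.le_floordiv_iff_mul_le (by norm_num : (0:Int) < 2)]
        push_cast
        omega
      omega
    · rw [List.mem_flatMap]
      refine ⟨(k : Int), ?_, ?_⟩
      · have hkdiv : (k:Int) ≤ PySem.Int.floordiv ((dHi : Nat) : Int) (n : Int) := by
          rw [PySem.Int.le_floordiv_iff_mul_le (by exact_mod_cast (by omega : 0 < n) : (0:Int) < (n:Int))]
          push_cast
          omega
        cases rc with
        | none =>
          rw [bKs, PySem.List.mem_pyRange_one]
          constructor
          · exact_mod_cast hk
          · omega
        | some r =>
          rcases hRC with hz | hkr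
          · rw [bKs]
            simp only [hz, ne_eq, not_true_eq_false, if_false, PySem.List.mem_pyRange_one]
            constructor
            · exact_mod_cast hk
            · omega
          · have hzne : r ≠ 0 := by rw [hkr]; exact_mod_cast (by omega : (k:Int) ≠ 0)
            rw [bKs]
            simp only [ne_eq, hzne, not_false_eq_true, if_true]
            rw [if_pos ⟨by omega, by omega⟩, hkr]
            exact List.mem_singleton.mpr rfl
      · rw [List.mem_map]
        refine ⟨(p : Int), ?_, ?_⟩
        · rw [PySem.List.mem_pyRange_one, Int.toNat_natCast, floordiv_pow_ten n (by omega)]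
          constructor
          · have : ((10:Int) ^ (n-1)) = ((10 ^ (n-1) : Nat) : Int) := by push_cast; ring
            rw [this]
            exact_mod_cast hp1
          · have : ((10:Int) ^ n) = ((10 ^ n : Nat) : Int) := by push_cast; ring
            rw [this]
            exact_mod_cast hp2
        · rw [Int.toNat_natCast, Int.toNat_natCast, repUnit_eq n k (by omega)]
          have hxm : x = ((x.toNat : Nat) : Int) := by omega
          rw [hxm, hmval]
          push_cast
          ring

lemma foldl_bStep (low high : Int) (xs : List Int) : ∀ (s : List Int) (t : Int),
    xs.foldl (bStep low high) (s, t) =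
      (PySem.Set.update s (xs.filter (fun x => decide (low ≤ x ∧ x < high))),
       t + (PySem.Set.update s (xs.filter (fun x => decide (low ≤ x ∧ x < high)))).sum - s.sum) := by
  induction xs with
  | nil => intro s t; simp [PySem.Set.update]
  | cons x xs ih =>
    intro s t
    rw [List.foldl_cons]
    by_cases hP : low ≤ x ∧ x < high
    · have hfil : (x :: xs).filter (fun x => decide (low ≤ x ∧ x < high)) =
          x :: xs.filter (fun x => decide (low ≤ x ∧ x < high)) := by
        rw [List.filter_cons_of_pos (by simpa using hP)]
      rw [hfil]
      have hupd : ∀ l, PySem.Set.update s (x :: l) = PySem.Set.update (PySem.Set.add s x) l := by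
        intro l; rfl
      rw [hupd]
      by_cases hc : PySem.Set.contains s x = true
      · have hstep : bStep low high (s, t) x = (s, t) := by
          rw [bStep, if_neg (fun h => h.2.2 hc)]
        have hadd : PySem.Set.add s x = s := by rw [PySem.Set.add, if_pos hc]
        rw [hstep, ih, hadd]
      · have hstep : bStep low high (s, t) x = (s ++ [x], t + x) := by
          rw [bStep, if_pos ⟨hP.1, hP.2, hc⟩]
          rw [PySem.Set.add, if_neg hc]
        have hadd : PySem.Set.add s x = s ++ [x] := by rw [PySem.Set.add, if_neg hc]
        rw [hstep, ih, hadd]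
        have hsum : (s ++ [x]).sum = s.sum + x := by simp
        rw [hsum]
        refine Prod.ext rfl ?_
        simp only
        ring
    · have hfil : (x :: xs).filter (fun x => decide (low ≤ x ∧ x < high)) =
          xs.filter (fun x => decide (low ≤ x ∧ x < high)) := by
        rw [List.filter_cons_of_neg (by simpa using hP)]
      have hstep : bStep low high (s, t) x = (s, t) := by
        rw [bStep, if_neg (by tauto)]
      rw [hfil, hstep, ih]

lemma a_eq_sum (low high : Int) (rc : Option Int) :
    get_substring_repeated_n_times low high rc =
      ((PySem.List.pyRange low high 1).filter (chk rc)).sum := by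
  rw [get_substring_repeated_n_times]
  have hbody : (fun (res : Int) (i : Int) =>
      let s := PySem.Int.toChars i
      if aInner s rc (PySem.List.pyRange 1 (PySem.Int.floordiv ((s.length : Nat) : Int) 2 + 1) 1)
      then res + i else res) =
      (fun (res : Int) (i : Int) => if chk rc i = true then res + i else res) := rfl
  rw [hbody, PySem.List.foldl_ite_eq_foldl_filter]
  have hfil : (fun (x : Int) => decide (chk rc x = true)) = chk rc := by
    funext x; cases chk rc x <;> simp
  rw [hfil]
  have := PySem.List.foldl_add (g := fun (x : Int) => x)
    (l := (PySem.List.pyRange low high 1).filter (chk rc)) (a := 0)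
  simpa using this

lemma b_eq_sum (low high : Int) (rc : Option Int) :
    get_substring_repeated_n_times_alt low high rc =
      (PySem.Set.ofList ((bStream (bDigitCount (high - 1) 1) rc).filter
        (fun x => decide (low ≤ x ∧ x < high)))).sum := by
  have h1 : get_substring_repeated_n_times_alt low high rc =
      ((bStream (bDigitCount (high - 1) 1) rc).foldl (bStep low high) (PySem.Set.empty, 0)).2 := by
    rw [get_substring_repeated_n_times_alt, bStream]
    simp only [List.foldl_flatMap, List.foldl_map]
  rw [h1, foldl_bStep]
  have h3 : ∀ (l : List Int), PySem.Set.update PySem.Set.empty l = PySem.Set.ofList l :=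
    fun l => rfl
  simp only [h3]
  simp [PySem.Set.empty]

-- ===== VERDICT (by name: the statement is the Claim_ definition above) =====
theorem get_substring_repeated_n_times_spec : Claim_equal_get_substring_repeated_n_times := by
  intro low high rc _
  show _ = _
  rw [a_eq_sum, b_eq_sum]
  apply List.Perm.sum_eq
  rw [List.perm_ext_iff_of_nodup ((PySem.List.nodup_pyRange_one low high).filter _)
    (PySem.Set.nodup_ofList _)]
  intro a
  rw [List.mem_filter, PySem.List.mem_pyRange_one, PySem.Set.mem_ofList, List.mem_filter]
  constructor
  · rintro ⟨⟨h1, h2⟩, hchk⟩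
    have ha1 : 1 ≤ a := by
      by_contra hle
      rw [chk_nonpos rc a (by omega)] at hchk
      exact absurd hchk (by simp)
    have hhi : 1 ≤ high - 1 := by omega
    refine ⟨?_, by simp; omega⟩
    rw [bDigitCount_eq _ hhi]
    rw [mem_bStream _ rc a ha1 (digits_len_mono a.toNat (high - 1).toNat (by omega) (by omega))]
    rw [← chk_iff rc a ha1]
    exact hchk
  · rintro ⟨hmem, hP⟩
    have hP' : low ≤ a ∧ a < high := by simpa using hP
    have ha1 : 1 ≤ a := bStream_pos _ rc a hmem
    have hhi : 1 ≤ high - 1 := by omega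
    rw [bDigitCount_eq _ hhi] at hmem
    rw [mem_bStream _ rc a ha1 (digits_len_mono a.toNat (high - 1).toNat (by omega) (by omega))] at hmem
    exact ⟨hP', (chk_iff rc a ha1).mpr hmem⟩
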